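-- pv_equiv track=rewrite | github.com/Vivekyadv/LeetCode | Arrays/Medium/1. container with most water.py | solve
-- ===== SOURCE A (Python) =====
-- def solve(height):
--     n = len(height)
--     maxWater = 0
--     for i in range(n):
--         for j in range(i+1, n):
--             if height[j] <= height[i]:
--                 water = height[j]*(j-i)
--                 if water > maxWater:
--                     maxWater = water
--     return maxWater
-- ===== SOURCE B (Python) =====
-- def _bisect_ge(vals, h):
--     # first index k with vals[k] >= h in a strictly increasing list, else len(vals)
--     lo, hi = 0, len(vals)
--     while lo < hi:
--         mid = (lo + hi) // 2
--         if vals[mid] >= h: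
--             hi = mid
--         else:
--             lo = mid + 1
--     return lo
--
--
-- def solve(height):
--     best = 0
--     vals = []   # strictly increasing prefix-maximum values
--     idxs = []   # their positions
--     for j, h in enumerate(height):
--         if h > 0 and vals:
--             k = _bisect_ge(vals, h)
--             if k < len(vals):
--                 w = h * (j - idxs[k])
--                 if w > best:
--                     best = w
--         if not vals or h > vals[-1]:
--             vals.append(h)
--             idxs.append(j)
--     return best
-- ===== Notes on version B (the rewrite author's own statement) =====
-- stated objective: faster
-- what changed: Replaces the all-pairs double loop by a single left-to-right pass that maintains the strictly increasing list of prefix-maximum records and binary-searches it for the leftmost index at least as tall as each current element.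
import Mathlib
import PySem

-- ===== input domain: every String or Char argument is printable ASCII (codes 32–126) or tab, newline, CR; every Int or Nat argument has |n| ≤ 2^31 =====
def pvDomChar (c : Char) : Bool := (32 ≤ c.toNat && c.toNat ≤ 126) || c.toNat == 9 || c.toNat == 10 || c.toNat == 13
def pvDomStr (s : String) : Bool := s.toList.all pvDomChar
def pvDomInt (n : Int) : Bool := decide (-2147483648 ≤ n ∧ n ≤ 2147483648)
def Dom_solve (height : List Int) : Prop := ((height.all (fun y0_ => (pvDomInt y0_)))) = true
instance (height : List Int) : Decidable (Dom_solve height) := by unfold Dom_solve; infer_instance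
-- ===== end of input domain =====

-- B replaces A's all-pairs double loop by one pass keeping the strictly increasing prefix-maximum
-- records and binary-searching them for the leftmost tall-enough partner of each j (objective: faster).

-- ===== PORT A =====
def solve (height : List Int) : Int :=
  let n : Int := (height.length : Int)
  (PySem.List.pyRange 0 n 1).foldl (fun maxWater i =>
    (PySem.List.pyRange (i+1) n 1).foldl (fun maxWater j =>
      if PySem.List.pyGetD height j 0 ≤ PySem.List.pyGetD height i 0 then
        let water := PySem.List.pyGetD height j 0 * (j - i)
        if water > maxWater then water else maxWater
      else maxWater) maxWater) 0

-- ===== PORT B =====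
-- _bisect_ge: while lo < hi loop; lo, hi, mid are nonnegative ints, so Nat is exact,
-- and vals[mid] is always in range (getD's default is never read).
def bisectGE (vals : List Int) (h : Int) (lo hi : Nat) : Nat :=
  if _hlt : lo < hi then
    let mid := (lo + hi) / 2
    if h ≤ vals.getD mid 0 then bisectGE vals h lo mid
    else bisectGE vals h (mid + 1) hi
  else lo
termination_by hi - lo
decreasing_by all_goals omega

-- the body of Source B's `for j, h in enumerate(height)` loop
def solveAltGo : List Int → Int → List Int → List Int → Int → Int
  | [], _, _, _, best => best
  | h :: t, j, vals, idxs, best =>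
      let best' :=
        if h > 0 ∧ vals ≠ [] then
          let k := bisectGE vals h 0 vals.length
          if k < vals.length then
            let w := h * (j - PySem.List.pyGetD idxs (k : Int) 0)
            if w > best then w else best
          else best
        else best
      if vals = [] ∨ PySem.List.pyGetD vals (-1) 0 < h then
        solveAltGo t (j + 1) (vals ++ [h]) (idxs ++ [j]) best'
      else
        solveAltGo t (j + 1) vals idxs best'

def solve_alt (height : List Int) : Int := solveAltGo height 0 [] [] 0

-- ===== PRECONDITION & SPEC =====
def Spec_solve (height : List Int) (out : Int) : Prop := out = solve_alt height
instance (height : List Int) (out : Int) : Decidable (Spec_solve height out) := by unfold Spec_solve; infer_instance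

-- ===== CLAIM (what is proved, stated in full; the proofs are below) =====
def Claim_equal_solve : Prop := ∀ (height : List Int), Dom_solve height → Spec_solve height (solve height)

-- ===== LEMMAS AND PROOFS =====

-- proof-only vocabulary -----------------------------------------------------

/-- `(i, j)` is a pair A draws a candidate from. -/
def GoodAt (H : List Int) (i j : Nat) : Prop :=
  i < j ∧ j < H.length ∧ H.getD j 0 ≤ H.getD i 0

/-- the candidate value of the pair `(i, j)`. -/
def cand (H : List Int) (i j : Nat) : Int := H.getD j 0 * ((j : Int) - (i : Int))

/-- characterisation of the common result. -/
def IsBest (H : List Int) (r : Int) : Prop :=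
  0 ≤ r ∧ (∀ i j, GoodAt H i j → cand H i j ≤ r) ∧
    (r = 0 ∨ ∃ i j, GoodAt H i j ∧ r = cand H i j)

theorem isBest_unique {H : List Int} {r₁ r₂ : Int} (h₁ : IsBest H r₁) (h₂ : IsBest H r₂) :
    r₁ = r₂ := by
  obtain ⟨z₁, b₁, a₁⟩ := h₁
  obtain ⟨z₂, b₂, a₂⟩ := h₂
  have le₁ : r₁ ≤ r₂ := by
    rcases a₁ with h | ⟨i, j, hg, he⟩
    · omega
    · exact he ▸ b₂ i j hg
  have le₂ : r₂ ≤ r₁ := by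
    rcases a₂ with h | ⟨i, j, hg, he⟩
    · omega
    · exact he ▸ b₁ i j hg
  omega

-- generic facts about A's max-accumulating folds ----------------------------

theorem fmax_le {β : Type} (p : β → Prop) [DecidablePred p] (f : β → Int) :
    ∀ (l : List β) (a : Int),
      a ≤ l.foldl (fun m x => if p x then (if f x > m then f x else m) else m) a := by
  intro l
  induction l with
  | nil => intro a; simp
  | cons x t ih =>
      intro a
      simp only [List.foldl_cons]
      have h1 := ih (if p x then (if f x > a then f x else a) else a)
      have h2 : a ≤ (if p x then (if f x > a then f x else a) else a) := by
        split_ifs <;> omega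
      omega

theorem fmax_ge {β : Type} (p : β → Prop) [DecidablePred p] (f : β → Int) :
    ∀ (l : List β) (a : Int) (x : β), x ∈ l → p x →
      f x ≤ l.foldl (fun m x => if p x then (if f x > m then f x else m) else m) a := by
  intro l
  induction l with
  | nil => intro a x hx; simp at hx
  | cons y t ih =>
      intro a x hx hp
      simp only [List.foldl_cons]
      rcases List.mem_cons.mp hx with rfl | hx
      · have h1 := fmax_le p f t (if p x then (if f x > a then f x else a) else a)
        have h2 : f x ≤ (if p x then (if f x > a then f x else a) else a) := by
          split_ifs <;> omega
        omega
      · exact ih _ x hx hp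

theorem fmax_attain {β : Type} (p : β → Prop) [DecidablePred p] (f : β → Int) :
    ∀ (l : List β) (a : Int),
      l.foldl (fun m x => if p x then (if f x > m then f x else m) else m) a = a ∨
        ∃ x ∈ l, p x ∧
          l.foldl (fun m x => if p x then (if f x > m then f x else m) else m) a = f x := by
  intro l
  induction l with
  | nil => intro a; left; rfl
  | cons y t ih =>
      intro a
      simp only [List.foldl_cons]
      rcases ih (if p y then (if f y > a then f y else a) else a) with h | ⟨x, hx, hp, he⟩
      · rw [h]
        by_cases hpy : p y
        · by_cases hgt : f y > a
          · right; exact ⟨y, List.mem_cons_self, hpy, by simp [hpy, hgt]⟩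
          · left; simp [hpy, hgt]
        · left; simp [hpy]
      · right; exact ⟨x, List.mem_cons_of_mem y hx, hp, he⟩

theorem foldl_le_mono {β : Type} (s : Int → β → Int) (hs : ∀ a x, a ≤ s a x) :
    ∀ (l : List β) (a : Int), a ≤ l.foldl s a := by
  intro l
  induction l with
  | nil => intro a; simp
  | cons x t ih =>
      intro a
      simp only [List.foldl_cons]
      exact le_trans (hs a x) (ih (s a x))

theorem foldl_attain {β : Type} (s : Int → β → Int) (Q : β → Int → Prop)
    (hs : ∀ a x, s a x = a ∨ Q x (s a x)) :
    ∀ (l : List β) (a : Int), l.foldl s a = a ∨ ∃ x ∈ l, Q x (l.foldl s a) := by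
  intro l
  induction l with
  | nil => intro a; left; rfl
  | cons y t ih =>
      intro a
      simp only [List.foldl_cons]
      rcases ih (s a y) with h | ⟨x, hx, hq⟩
      · rw [h]
        rcases hs a y with h2 | h2
        · left; exact h2
        · right; exact ⟨y, List.mem_cons_self, h2⟩
      · right; exact ⟨x, List.mem_cons_of_mem y hx, hq⟩

-- A computes IsBest ---------------------------------------------------------

theorem solve_isBest (H : List Int) : IsBest H (solve H) := by
  have hsolve : solve H = (PySem.List.pyRange 0 (H.length : Int) 1).foldl
      (fun m i => (PySem.List.pyRange (i + 1) (H.length : Int) 1).foldl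
        (fun m j => if PySem.List.pyGetD H j 0 ≤ PySem.List.pyGetD H i 0 then
            (if PySem.List.pyGetD H j 0 * (j - i) > m then PySem.List.pyGetD H j 0 * (j - i) else m)
          else m) m) 0 := rfl
  refine ⟨?_, ?_, ?_⟩
  · rw [hsolve]
    exact foldl_le_mono _
      (fun a i => fmax_le (fun j => PySem.List.pyGetD H j 0 ≤ PySem.List.pyGetD H i 0)
        (fun j => PySem.List.pyGetD H j 0 * (j - i)) _ a) _ 0
  · rintro i j ⟨hij, hjlen, hcond⟩
    have hmem : (i : Int) ∈ PySem.List.pyRange 0 (H.length : Int) 1 := by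
      rw [PySem.List.mem_pyRange_one]; omega
    obtain ⟨l1, l2, hsplit⟩ := List.append_of_mem hmem
    rw [hsolve, hsplit, List.foldl_append, List.foldl_cons]
    have hjm : (j : Int) ∈ PySem.List.pyRange ((i : Int) + 1) (H.length : Int) 1 := by
      rw [PySem.List.mem_pyRange_one]; omega
    have hpv : PySem.List.pyGetD H (j : Int) 0 ≤ PySem.List.pyGetD H (i : Int) 0 := by
      simpa using hcond
    have hcand : cand H i j = PySem.List.pyGetD H (j : Int) 0 * ((j : Int) - (i : Int)) := by
      simp [cand]
    rw [hcand]
    refine le_trans ?_ (foldl_le_mono _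
      (fun a ii => fmax_le (fun jj => PySem.List.pyGetD H jj 0 ≤ PySem.List.pyGetD H ii 0)
        (fun jj => PySem.List.pyGetD H jj 0 * (jj - ii)) _ a) l2 _)
    exact fmax_ge (fun jj => PySem.List.pyGetD H jj 0 ≤ PySem.List.pyGetD H ((i : Int)) 0)
      (fun jj => PySem.List.pyGetD H jj 0 * (jj - (i : Int))) _ _ ((j : Int)) hjm hpv

  · have hQ : ∀ (a : Int) (i : Int),
        (fun m i => (PySem.List.pyRange (i + 1) (H.length : Int) 1).foldl
          (fun m j => if PySem.List.pyGetD H j 0 ≤ PySem.List.pyGetD H i 0 then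
              (if PySem.List.pyGetD H j 0 * (j - i) > m then PySem.List.pyGetD H j 0 * (j - i) else m)
            else m) m) a i = a ∨
        (fun i r => ∃ jI : Int, (i + 1 ≤ jI ∧ jI < (H.length : Int) ∧
            PySem.List.pyGetD H jI 0 ≤ PySem.List.pyGetD H i 0) ∧
          r = PySem.List.pyGetD H jI 0 * (jI - i)) i
          ((fun m i => (PySem.List.pyRange (i + 1) (H.length : Int) 1).foldl
            (fun m j => if PySem.List.pyGetD H j 0 ≤ PySem.List.pyGetD H i 0 then
                (if PySem.List.pyGetD H j 0 * (j - i) > m then PySem.List.pyGetD H j 0 * (j - i) else m)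
              else m) m) a i) := by
      intro a i
      rcases fmax_attain (fun j => PySem.List.pyGetD H j 0 ≤ PySem.List.pyGetD H i 0)
        (fun j => PySem.List.pyGetD H j 0 * (j - i))
        (PySem.List.pyRange (i + 1) (H.length : Int) 1) a with h | ⟨jI, hjm, hp, he⟩
      · left; exact h
      · right
        rw [PySem.List.mem_pyRange_one] at hjm
        exact ⟨jI, ⟨hjm.1, hjm.2, hp⟩, he⟩
    rw [hsolve]
    rcases foldl_attain
      (fun m i => (PySem.List.pyRange (i + 1) (H.length : Int) 1).foldl
        (fun m j => if PySem.List.pyGetD H j 0 ≤ PySem.List.pyGetD H i 0 then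
            (if PySem.List.pyGetD H j 0 * (j - i) > m then PySem.List.pyGetD H j 0 * (j - i) else m)
          else m) m)
      (fun i r => ∃ jI : Int, (i + 1 ≤ jI ∧ jI < (H.length : Int) ∧
          PySem.List.pyGetD H jI 0 ≤ PySem.List.pyGetD H i 0) ∧
        r = PySem.List.pyGetD H jI 0 * (jI - i))
      hQ (PySem.List.pyRange 0 (H.length : Int) 1) 0 with h | ⟨i, hi, jI, ⟨hj1, hj2, hc⟩, he⟩
    · left; exact h
    · right
      rw [PySem.List.mem_pyRange_one] at hi
      refine ⟨i.toNat, jI.toNat, ⟨?_, ?_, ?_⟩, ?_⟩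
      · omega
      · omega
      · have e1 : ((i.toNat : Nat) : Int) = i := Int.toNat_of_nonneg hi.1
        have e2 : ((jI.toNat : Nat) : Int) = jI := Int.toNat_of_nonneg (by omega)
        have h' := hc
        rw [← e1, ← e2] at h'
        simp only [PySem.List.pyGetD_natCast] at h'
        exact h'
      · have e1 : ((i.toNat : Nat) : Int) = i := Int.toNat_of_nonneg hi.1
        have e2 : ((jI.toNat : Nat) : Int) = jI := Int.toNat_of_nonneg (by omega)
        rw [he, ← e1, ← e2]
        simp only [cand, PySem.List.pyGetD_natCast, Int.toNat_natCast]

-- B-side: prefix-maximum records --------------------------------------------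

/-- positions that strictly exceed everything before them, among the first `j`. -/
def recs (H : List Int) (j : Nat) : List Nat :=
  (List.range j).filter (fun i => (List.range i).all (fun i' => H.getD i' 0 < H.getD i 0))

theorem recs_zero (H : List Int) : recs H 0 = [] := rfl

theorem recs_succ (H : List Int) (j : Nat) :
    recs H (j + 1) = recs H j ++
      (if (List.range j).all (fun i' => H.getD i' 0 < H.getD j 0) then [j] else []) := by
  cases hall : (List.range j).all (fun i' => decide (H.getD i' 0 < H.getD j 0)) with
  | false =>
      simp only [List.getD_eq_getElem?_getD] at hall
      simp [recs, List.range_succ, List.filter_append, hall]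
  | true =>
      simp only [List.getD_eq_getElem?_getD] at hall
      simp [recs, List.range_succ, List.filter_append, hall]

theorem mem_recs {H : List Int} {j r : Nat} :
    r ∈ recs H j ↔ r < j ∧ ∀ i' < r, H.getD i' 0 < H.getD r 0 := by
  simp [recs, List.mem_filter, List.mem_range, List.all_eq_true]

theorem recs_pairwise (H : List Int) (j : Nat) : (recs H j).Pairwise (· < ·) := by
  exact (List.pairwise_lt_range).filter _

/-- every prefix position is dominated from the left by a record. -/
theorem recs_dominates {H : List Int} {j : Nat} : ∀ i, i < j →
    ∃ r ∈ recs H j, r ≤ i ∧ H.getD i 0 ≤ H.getD r 0 := by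
  intro i
  induction i using Nat.strong_induction_on with
  | _ i ih =>
    intro hi
    by_cases hrec : ∀ i' < i, H.getD i' 0 < H.getD i 0
    · exact ⟨i, mem_recs.mpr ⟨hi, hrec⟩, le_refl _, le_refl _⟩
    · push Not at hrec
      obtain ⟨i', hi', hle⟩ := hrec
      obtain ⟨r, hr, hri, hHr⟩ := ih i' hi' (lt_trans hi' hi)
      exact ⟨r, hr, le_trans hri (le_of_lt hi'), le_trans hle hHr⟩

-- binary-search correctness -------------------------------------------------

theorem bisectGE_inv (vals : List Int) (h : Int)
    (mono : ∀ k₁ k₂, k₁ ≤ k₂ → k₂ < vals.length → vals.getD k₁ 0 ≤ vals.getD k₂ 0) :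
    ∀ lo hi, hi ≤ vals.length → lo ≤ hi →
      lo ≤ bisectGE vals h lo hi ∧ bisectGE vals h lo hi ≤ hi ∧
        (∀ k, lo ≤ k → k < bisectGE vals h lo hi → vals.getD k 0 < h) ∧
        (bisectGE vals h lo hi < hi → h ≤ vals.getD (bisectGE vals h lo hi) 0) := by
  have main : ∀ (d lo hi : Nat), hi - lo ≤ d → hi ≤ vals.length → lo ≤ hi →
      lo ≤ bisectGE vals h lo hi ∧ bisectGE vals h lo hi ≤ hi ∧
        (∀ k, lo ≤ k → k < bisectGE vals h lo hi → vals.getD k 0 < h) ∧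
        (bisectGE vals h lo hi < hi → h ≤ vals.getD (bisectGE vals h lo hi) 0) := by
    intro d
    induction d with
    | zero =>
        intro lo hi hd hhi hlo
        have he : lo = hi := by omega
        subst he
        rw [bisectGE]
        rw [dif_neg (lt_irrefl _)]
        exact ⟨le_refl _, le_refl _, fun k h1 h2 => by omega, fun hr => absurd hr (lt_irrefl _)⟩
    | succ d ihd =>
        intro lo hi hd hhi hlo
        rw [bisectGE]
        by_cases hlt : lo < hi
        · simp only [dif_pos hlt]
          by_cases hle : h ≤ vals.getD ((lo + hi) / 2) 0
          · simp only [if_pos hle]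
            obtain ⟨c1, c2, c3, c4⟩ := ihd lo ((lo + hi) / 2) (by omega) (by omega) (by omega)
            refine ⟨c1, by omega, c3, ?_⟩
            intro hr
            by_cases hr2 : bisectGE vals h lo ((lo + hi) / 2) < (lo + hi) / 2
            · exact c4 hr2
            · have : bisectGE vals h lo ((lo + hi) / 2) = (lo + hi) / 2 := by omega
              rw [this]; exact hle
          · simp only [if_neg hle]
            obtain ⟨c1, c2, c3, c4⟩ := ihd ((lo + hi) / 2 + 1) hi (by omega) hhi (by omega)
            refine ⟨by omega, c2, ?_, c4⟩
            intro k hk1 hk2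
            by_cases hk3 : k ≤ (lo + hi) / 2
            · calc vals.getD k 0 ≤ vals.getD ((lo + hi) / 2) 0 := mono k _ hk3 (by omega)
                _ < h := by omega
            · exact c3 k (by omega) hk2
        · rw [dif_neg hlt]
          exact ⟨le_refl _, by omega, fun k h1 h2 => by omega, fun hr => absurd hr hlt⟩
  intro lo hi hhi hlo
  exact main (hi - lo) lo hi (le_refl _) hhi hlo

-- B computes IsBest ---------------------------------------------------------

-- records are increasing as positions and as values --------------------------

theorem recs_getD_mono (H : List Int) (j : Nat) {k1 k2 : Nat} (hk : k1 ≤ k2)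
    (h2 : k2 < (recs H j).length) : (recs H j).getD k1 0 ≤ (recs H j).getD k2 0 := by
  have h1 : k1 < (recs H j).length := by omega
  rw [List.getD_eq_getElem _ _ h1, List.getD_eq_getElem _ _ h2]
  rcases Nat.lt_or_ge k1 k2 with hlt | hge
  · exact le_of_lt (List.pairwise_iff_getElem.mp (recs_pairwise H j) k1 k2 h1 h2 hlt)
  · have he : k1 = k2 := by omega
    subst he; exact le_refl _

theorem vals_mono (H : List Int) (j : Nat) : ∀ k1 k2, k1 ≤ k2 →
    k2 < ((recs H j).map (fun i => H.getD i 0)).length →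
    ((recs H j).map (fun i => H.getD i 0)).getD k1 0 ≤
      ((recs H j).map (fun i => H.getD i 0)).getD k2 0 := by
  intro k1 k2 hk h2
  rw [List.length_map] at h2
  have h1 : k1 < (recs H j).length := by omega
  rw [List.getD_eq_getElem _ _ (by simpa using h1), List.getD_eq_getElem _ _ (by simpa using h2)]
  simp only [List.getElem_map]
  rcases Nat.eq_or_lt_of_le hk with rfl | hlt
  · exact le_refl _
  · have hrr : (recs H j)[k1] < (recs H j)[k2] :=
      List.pairwise_iff_getElem.mp (recs_pairwise H j) _ _ h1 h2 hlt
    obtain ⟨-, hrec⟩ := mem_recs.mp (List.getElem_mem h2)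
    exact le_of_lt (hrec _ hrr)

theorem recs_ne_nil {H : List Int} {j : Nat} (hj : 0 < j) : recs H j ≠ [] :=
  List.ne_nil_of_mem (mem_recs.mpr ⟨hj, fun i' h => absurd h (Nat.not_lt_zero i')⟩)

theorem recs_last_max (H : List Int) (j : Nat) (hne : recs H j ≠ []) :
    ∀ i < j, H.getD i 0 ≤ H.getD ((recs H j).getLast hne) 0 := by
  intro i hij
  obtain ⟨r, hr, hri, hHr⟩ := recs_dominates i hij
  refine le_trans hHr ?_
  obtain ⟨k, hk, hkr⟩ := List.getElem_of_mem hr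
  rw [List.getLast_eq_getElem]
  rcases Nat.eq_or_lt_of_le (show k ≤ (recs H j).length - 1 by omega) with heq | hlt
  · subst heq; rw [hkr]
  · have hpos : 0 < (recs H j).length := List.length_pos_of_ne_nil hne
    have hrr : (recs H j)[k] < (recs H j)[(recs H j).length - 1] :=
      List.pairwise_iff_getElem.mp (recs_pairwise H j) _ _ hk (by omega) hlt
    obtain ⟨-, hrec⟩ := mem_recs.mp
      (List.getElem_mem (by omega : (recs H j).length - 1 < (recs H j).length))
    rw [← hkr]
    exact le_of_lt (hrec _ hrr)

-- B computes IsBest ---------------------------------------------------------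

theorem go_spec (H : List Int) : ∀ (t : List Int) (jn : Nat) (best : Int),
    t = H.drop jn → jn ≤ H.length → 0 ≤ best →
    (best ≤ solveAltGo t (jn : Int) ((recs H jn).map (fun i => H.getD i 0))
        ((recs H jn).map (fun i : Nat => (i : Int))) best) ∧
    (∀ i j, GoodAt H i j → jn ≤ j →
        cand H i j ≤ solveAltGo t (jn : Int) ((recs H jn).map (fun i => H.getD i 0))
          ((recs H jn).map (fun i : Nat => (i : Int))) best) ∧
    (solveAltGo t (jn : Int) ((recs H jn).map (fun i => H.getD i 0))
        ((recs H jn).map (fun i : Nat => (i : Int))) best = best ∨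
      ∃ i j, GoodAt H i j ∧
        solveAltGo t (jn : Int) ((recs H jn).map (fun i => H.getD i 0))
          ((recs H jn).map (fun i : Nat => (i : Int))) best = cand H i j) := by
  intro t
  induction t with
  | nil =>
      intro jn best ht hle hb
      have hge : H.length ≤ jn := by
        have := List.drop_eq_nil_iff.mp ht.symm
        omega
      refine ⟨le_refl _, ?_, Or.inl rfl⟩
      rintro i j ⟨hij, hjl, -⟩ hjn
      omega
  | cons h t' ih =>
      intro jn best ht hle hb
      have hlen : jn < H.length := by
        by_contra hc
        rw [List.drop_eq_nil_iff.mpr (by omega)] at ht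
        exact List.cons_ne_nil h t' ht
      have hhead : H.getD jn 0 = h := by
        have h0 := congrArg (fun l => l[0]?.getD (0 : Int)) ht
        simp only [List.getElem?_drop, Nat.add_zero] at h0
        rw [List.getD_eq_getElem?_getD]
        simp at h0 ⊢
        omega
      have hhead' : H[jn]?.getD 0 = h := by
        rw [← List.getD_eq_getElem?_getD]
        exact hhead
      have htail : t' = H.drop (jn + 1) := by
        have h1 := congrArg (List.drop 1) ht
        simpa [List.drop_drop, Nat.add_comm] using h1
      -- common machinery, parameterised by the accumulated best after this step
      have main : ∀ (hall : ((List.range jn).all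
            (fun i' => decide (H.getD i' 0 < H.getD jn 0))) = true) (best' : Int),
          0 ≤ best' → best ≤ best' →
          (∀ i, GoodAt H i jn → cand H i jn ≤ best') →
          (best' = best ∨ ∃ i, GoodAt H i jn ∧ best' = cand H i jn) →
          (best ≤ solveAltGo t' ((jn : Int) + 1)
              ((recs H jn).map (fun i => H.getD i 0) ++ [h])
              ((recs H jn).map (fun i : Nat => (i : Int)) ++ [(jn : Int)]) best') ∧
          (∀ i j, GoodAt H i j → jn ≤ j →
              cand H i j ≤ solveAltGo t' ((jn : Int) + 1)
                ((recs H jn).map (fun i => H.getD i 0) ++ [h])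
                ((recs H jn).map (fun i : Nat => (i : Int)) ++ [(jn : Int)]) best') ∧
          (solveAltGo t' ((jn : Int) + 1)
              ((recs H jn).map (fun i => H.getD i 0) ++ [h])
              ((recs H jn).map (fun i : Nat => (i : Int)) ++ [(jn : Int)]) best' = best ∨
            ∃ i j, GoodAt H i j ∧ solveAltGo t' ((jn : Int) + 1)
              ((recs H jn).map (fun i => H.getD i 0) ++ [h])
              ((recs H jn).map (fun i : Nat => (i : Int)) ++ [(jn : Int)]) best' = cand H i j) := by
        intro hall best' hb' hbb hstep hatt
        have hv : (recs H (jn + 1)).map (fun i => H.getD i 0) =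
            (recs H jn).map (fun i => H.getD i 0) ++ [h] := by
          rw [recs_succ H jn, if_pos hall]
          simp [hhead']
        have hx : (recs H (jn + 1)).map (fun i : Nat => (i : Int)) =
            (recs H jn).map (fun i : Nat => (i : Int)) ++ [(jn : Int)] := by
          rw [recs_succ H jn, if_pos hall]
          simp
        have hc : ((jn + 1 : Nat) : Int) = (jn : Int) + 1 := by push_cast; ring
        obtain ⟨c1, c2, c3⟩ := ih (jn + 1) best' htail (by omega) hb'
        rw [hv, hx, hc] at c1 c2 c3
        refine ⟨le_trans hbb c1, ?_, ?_⟩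
        · intro i j hg hjn
          rcases Nat.eq_or_lt_of_le hjn with rfl | hlt
          · exact le_trans (hstep i hg) c1
          · exact c2 i j hg hlt
        · rcases c3 with hc3 | ⟨i, j, hg, he⟩
          · rcases hatt with hc4 | ⟨i, hg, he⟩
            · left; rw [hc3, hc4]
            · right; exact ⟨i, jn, hg, by rw [hc3, he]⟩
          · right; exact ⟨i, j, hg, he⟩
      have mainStay : ∀ (hall : ((List.range jn).all
            (fun i' => decide (H.getD i' 0 < H.getD jn 0))) = false) (best' : Int),
          0 ≤ best' → best ≤ best' →
          (∀ i, GoodAt H i jn → cand H i jn ≤ best') →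
          (best' = best ∨ ∃ i, GoodAt H i jn ∧ best' = cand H i jn) →
          (best ≤ solveAltGo t' ((jn : Int) + 1)
              ((recs H jn).map (fun i => H.getD i 0))
              ((recs H jn).map (fun i : Nat => (i : Int))) best') ∧
          (∀ i j, GoodAt H i j → jn ≤ j →
              cand H i j ≤ solveAltGo t' ((jn : Int) + 1)
                ((recs H jn).map (fun i => H.getD i 0))
                ((recs H jn).map (fun i : Nat => (i : Int))) best') ∧
          (solveAltGo t' ((jn : Int) + 1)
              ((recs H jn).map (fun i => H.getD i 0))
              ((recs H jn).map (fun i : Nat => (i : Int))) best' = best ∨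
            ∃ i j, GoodAt H i j ∧ solveAltGo t' ((jn : Int) + 1)
              ((recs H jn).map (fun i => H.getD i 0))
              ((recs H jn).map (fun i : Nat => (i : Int))) best' = cand H i j) := by
        intro hall best' hb' hbb hstep hatt
        have hv : (recs H (jn + 1)).map (fun i => H.getD i 0) =
            (recs H jn).map (fun i => H.getD i 0) := by
          rw [recs_succ H jn, if_neg (by rw [hall]; exact Bool.false_ne_true)]
          simp
        have hx : (recs H (jn + 1)).map (fun i : Nat => (i : Int)) =
            (recs H jn).map (fun i : Nat => (i : Int)) := by
          rw [recs_succ H jn, if_neg (by rw [hall]; exact Bool.false_ne_true)]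
          simp
        have hc : ((jn + 1 : Nat) : Int) = (jn : Int) + 1 := by push_cast; ring
        obtain ⟨c1, c2, c3⟩ := ih (jn + 1) best' htail (by omega) hb'
        rw [hv, hx, hc] at c1 c2 c3
        refine ⟨le_trans hbb c1, ?_, ?_⟩
        · intro i j hg hjn
          rcases Nat.eq_or_lt_of_le hjn with rfl | hlt
          · exact le_trans (hstep i hg) c1
          · exact c2 i j hg hlt
        · rcases c3 with hc3 | ⟨i, j, hg, he⟩
          · rcases hatt with hc4 | ⟨i, hg, he⟩
            · left; rw [hc3, hc4]
            · right; exact ⟨i, jn, hg, by rw [hc3, he]⟩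
          · right; exact ⟨i, j, hg, he⟩
      -- unfold one loop step (duplicating the best' computation into both branches is definitional)
      have hunf : ∀ (vals idxs : List Int) (b : Int), solveAltGo (h :: t') (jn : Int) vals idxs b =
          (if vals = [] ∨ PySem.List.pyGetD vals (-1) 0 < h then
            solveAltGo t' ((jn : Int) + 1) (vals ++ [h]) (idxs ++ [(jn : Int)])
              (if h > 0 ∧ vals ≠ [] then
                (if bisectGE vals h 0 vals.length < vals.length then
                  (if h * ((jn : Int) - PySem.List.pyGetD idxs ((bisectGE vals h 0 vals.length : Nat) : Int) 0) > b then
                    h * ((jn : Int) - PySem.List.pyGetD idxs ((bisectGE vals h 0 vals.length : Nat) : Int) 0) else b)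
                else b)
              else b)
          else
            solveAltGo t' ((jn : Int) + 1) vals idxs
              (if h > 0 ∧ vals ≠ [] then
                (if bisectGE vals h 0 vals.length < vals.length then
                  (if h * ((jn : Int) - PySem.List.pyGetD idxs ((bisectGE vals h 0 vals.length : Nat) : Int) 0) > b then
                    h * ((jn : Int) - PySem.List.pyGetD idxs ((bisectGE vals h 0 vals.length : Nat) : Int) 0) else b)
                else b)
              else b)) := by
        intro vals idxs b
        show (let best' := _; if vals = [] ∨ PySem.List.pyGetD vals (-1) 0 < h then
            solveAltGo t' ((jn : Int) + 1) (vals ++ [h]) (idxs ++ [(jn : Int)]) best'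
          else solveAltGo t' ((jn : Int) + 1) vals idxs best') = _
        split <;> rfl
      rw [hunf]
      set V := (recs H jn).map (fun i => H.getD i 0) with hV
      set X := (recs H jn).map (fun i : Nat => (i : Int)) with hX
      set K := bisectGE V h 0 V.length with hK
      set B : Int := (if h > 0 ∧ V ≠ [] then
          (if K < V.length then
            (if h * ((jn : Int) - PySem.List.pyGetD X ((K : Nat) : Int) 0) > best then
              h * ((jn : Int) - PySem.List.pyGetD X ((K : Nat) : Int) 0) else best)
          else best)
        else best) with hB
      have hlenv : V.length = (recs H jn).length := by rw [hV]; exact List.length_map ..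
      have hlenx : X.length = (recs H jn).length := by rw [hX]; exact List.length_map ..
      obtain ⟨-, hk2, hk3, hk4⟩ :=
        bisectGE_inv V h (hV ▸ vals_mono H jn) 0 V.length (le_refl _) (Nat.zero_le _)
      rw [← hK] at hk2 hk3 hk4
      have hidx : ∀ (hKlt : K < (recs H jn).length),
          PySem.List.pyGetD X ((K : Nat) : Int) 0 = (((recs H jn)[K]'hKlt : Nat) : Int) := by
        intro hKlt
        rw [PySem.List.pyGetD_natCast, hX, List.getD_eq_getElem _ _ (by simpa using hKlt)]
        simp
      have hvalK : ∀ (hKlt : K < (recs H jn).length),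
          V.getD K 0 = H.getD ((recs H jn)[K]'hKlt) 0 := by
        intro hKlt
        rw [hV, List.getD_eq_getElem _ _ (by simpa using hKlt)]
        simp
      have hb'0 : 0 ≤ B := by rw [hB]; split_ifs <;> omega
      have hbb : best ≤ B := by rw [hB]; split_ifs <;> omega
      have hstep : ∀ i, GoodAt H i jn → cand H i jn ≤ B := by
        rintro i ⟨hij, hjl, hcond⟩
        by_cases hp : h > 0
        · have hjn0 : 0 < jn := by omega
          have hRn : recs H jn ≠ [] := recs_ne_nil hjn0
          have hvne : V ≠ [] := by rw [hV]; simpa using hRn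
          obtain ⟨r, hr, hri, hHr⟩ := recs_dominates i hij
          obtain ⟨kr, hkr, hkreq⟩ := List.getElem_of_mem hr
          have hvkr : V.getD kr 0 = H.getD r 0 := by
            rw [hV, List.getD_eq_getElem _ _ (by simpa using hkr)]
            simp [hkreq]
          have hge : h ≤ V.getD kr 0 := by
            rw [hvkr]
            calc h = H.getD jn 0 := hhead.symm
              _ ≤ H.getD i 0 := hcond
              _ ≤ H.getD r 0 := hHr
          have hkle : K ≤ kr := by
            by_contra hcon
            exact absurd hge (not_le.mpr (hk3 kr (Nat.zero_le _) (by omega)))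
          have hKlt : K < (recs H jn).length := by omega
          have hrk_le : (recs H jn)[K]'hKlt ≤ i := by
            have h1 : (recs H jn).getD K 0 ≤ (recs H jn).getD kr 0 := recs_getD_mono H jn hkle hkr
            rw [List.getD_eq_getElem _ _ hKlt, List.getD_eq_getElem _ _ hkr, hkreq] at h1
            omega
          have hwle : cand H i jn ≤ h * ((jn : Int) - (((recs H jn)[K]'hKlt : Nat) : Int)) := by
            simp only [cand, hhead]
            apply mul_le_mul_of_nonneg_left _ (le_of_lt hp)
            have : ((recs H jn)[K]'hKlt : Int) ≤ (i : Int) := by exact_mod_cast hrk_le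
            omega
          rw [hB, if_pos ⟨hp, hvne⟩, if_pos (show K < V.length by omega), hidx hKlt]
          split_ifs with hw
          · exact hwle
          · exact le_trans hwle (not_lt.mp hw)
        · have h1 : (0 : Int) ≤ (jn : Int) - (i : Int) := by
            have : (i : Int) ≤ (jn : Int) := by exact_mod_cast le_of_lt hij
            omega
          have hcle : cand H i jn ≤ 0 := by
            simp only [cand, hhead]
            exact mul_nonpos_iff.mpr (Or.inr ⟨by omega, h1⟩)
          exact le_trans hcle (le_trans hb hbb)
      have hatt : B = best ∨ ∃ i, GoodAt H i jn ∧ B = cand H i jn := by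
        rw [hB]
        by_cases hc1 : h > 0 ∧ V ≠ []
        · rw [if_pos hc1]
          by_cases hc2 : K < V.length
          · rw [if_pos hc2]
            have hKlt : K < (recs H jn).length := by omega
            have hgood : GoodAt H ((recs H jn)[K]'hKlt) jn := by
              obtain ⟨hlt, -⟩ := mem_recs.mp (List.getElem_mem hKlt)
              refine ⟨hlt, hlen, ?_⟩
              rw [hhead]
              have := hk4 hc2
              rw [hvalK hKlt] at this
              exact this
            by_cases hc3 : h * ((jn : Int) - PySem.List.pyGetD X ((K : Nat) : Int) 0) > best
            · right
              refine ⟨(recs H jn)[K]'hKlt, hgood, ?_⟩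
              rw [if_pos hc3, hidx hKlt]
              simp only [cand, hhead]
            · left; rw [if_neg hc3]
          · rw [if_neg hc2]; left; rfl
        · rw [if_neg hc1]; left; rfl
      by_cases hpush : V = [] ∨ PySem.List.pyGetD V (-1) 0 < h
      · rw [if_pos hpush]
        have hall : ((List.range jn).all
            (fun i' => decide (H.getD i' 0 < H.getD jn 0))) = true := by
          by_cases hR0 : recs H jn = []
          · have hjn0 : jn = 0 := by
              by_contra h0
              exact recs_ne_nil (by omega) hR0
            subst hjn0; rfl
          · have hvne : V ≠ [] := by rw [hV]; simpa using hR0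
            have hlastv : PySem.List.pyGetD V (-1) 0 = H.getD ((recs H jn).getLast hR0) 0 := by
              rw [PySem.List.pyGetD_neg_one V 0 hvne]
              have hgl := List.getLast_map (f := fun i : Nat => H.getD i 0) (l := recs H jn) hvne
              exact hgl
            have hlast_lt : H.getD ((recs H jn).getLast hR0) 0 < h := by
              rcases hpush with hcase | hcase
              · exact absurd hcase hvne
              · rw [hlastv] at hcase; exact hcase
            rw [List.all_eq_true]
            intro x hx
            rw [List.mem_range] at hx
            rw [decide_eq_true_eq, hhead]
            exact lt_of_le_of_lt (recs_last_max H jn hR0 x hx) hlast_lt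
        exact main hall B hb'0 hbb hstep hatt
      · rw [if_neg hpush]
        push Not at hpush
        obtain ⟨hvne, hgel⟩ := hpush
        have hR0 : recs H jn ≠ [] := by
          intro hc; rw [hV, hc] at hvne; exact hvne rfl
        have hlastv : PySem.List.pyGetD V (-1) 0 = H.getD ((recs H jn).getLast hR0) 0 := by
          rw [PySem.List.pyGetD_neg_one V 0 hvne]
          have hgl := List.getLast_map (f := fun i : Nat => H.getD i 0) (l := recs H jn) hvne
          exact hgl
        have hall : ((List.range jn).all
            (fun i' => decide (H.getD i' 0 < H.getD jn 0))) = false := by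
          rw [List.all_eq_false]
          obtain ⟨hlt, -⟩ := mem_recs.mp (List.getLast_mem hR0)
          refine ⟨(recs H jn).getLast hR0, List.mem_range.mpr hlt, ?_⟩
          rw [hlastv] at hgel
          simp only [decide_eq_true_eq, hhead]
          omega
        exact mainStay hall B hb'0 hbb hstep hatt


theorem solve_alt_isBest (H : List Int) : IsBest H (solve_alt H) := by
  have h := go_spec H H 0 0 (List.drop_zero (l := H)).symm (Nat.zero_le _) (le_refl 0)
  simp only [recs_zero, List.map_nil, Nat.cast_zero] at h
  obtain ⟨c1, c2, c3⟩ := h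
  exact ⟨c1, fun i j hg => c2 i j hg (Nat.zero_le _), c3⟩

-- ===== VERDICT (by name: the statement is the Claim_ definition above) =====
theorem solve_spec : Claim_equal_solve := by
  intro H _
  unfold Spec_solve
  exact isBest_unique (solve_isBest H) (solve_alt_isBest H)
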